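-- pv_equiv track=rewrite | github.com/Dlfmiee/CP125-Class-Repo | labs/lab06/exercise2/exercise2.py | match_specialists
-- ===== SOURCE A (Python) =====
-- def match_specialists(candidates_list, project_requirements):
--
--     skill_counts = {}
--     for candidate in candidates_list:
--         name = candidate[0]
--         skills = candidate[1]
--         for skill in skills:
--             if skill in skill_counts:
--                 skill_counts[skill] += 1
--             else:
--                 skill_counts[skill] = 1
--
--
--     rare_skills = set()
--     for skill in skill_counts:
--         if skill_counts[skill] < 3:
--             rare_skills.add(skill)
--
--     result = []
--     for candidate in candidates_list:
--         name = candidate[0]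
--         skills = candidate[1]
--
--         has_all_required = True
--         for req in project_requirements:
--             if req not in skills:
--                 has_all_required = False
--                 break
--
--         if has_all_required:
--             rare_in_candidate = skills & rare_skills
--
--             if rare_in_candidate:
--                 result.append((name, rare_in_candidate))
--
--     return result
-- ===== SOURCE B (Python) =====
-- def match_specialists(candidates_list, project_requirements):
--     # Saturating three-set classifier instead of a counting dict: after the scan,
--     # `common` holds exactly the skills occurring 3 or more times overall,
--     # `once`/`twice` those seen exactly once/twice so far.
--     once, twice, common = set(), set(), set()
--     for _name, skills in candidates_list:
--         for s in skills:
--             if s in common: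
--                 continue
--             if s in twice:
--                 twice.discard(s)
--                 common.add(s)
--             elif s in once:
--                 once.discard(s)
--                 twice.add(s)
--             else:
--                 once.add(s)
--
--     required = set(project_requirements)
--
--     # Build the result recursively, back to front; a skill is rare iff it is
--     # not in `common` (count < 3), so no rare-skills set is ever materialised.
--     def pick(rest):
--         if not rest:
--             return []
--         name, skills = rest[0]
--         tail = pick(rest[1:])
--         if required <= skills:
--             rare = skills - common
--             if rare:
--                 return [(name, rare)] + tail
--         return tail
--
--     return pick(candidates_list)
-- ===== Notes on version B (the rewrite author's own statement) =====
-- stated objective: alternative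
-- what changed: B replaces A's counting dict and precomputed rare_skills set with a saturating three-set once/twice/common classifier (pure set membership, no counts), and builds the result by structural recursion back-to-front, testing rarity as 's not in common' instead of intersecting with a rare set.
import Mathlib
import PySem

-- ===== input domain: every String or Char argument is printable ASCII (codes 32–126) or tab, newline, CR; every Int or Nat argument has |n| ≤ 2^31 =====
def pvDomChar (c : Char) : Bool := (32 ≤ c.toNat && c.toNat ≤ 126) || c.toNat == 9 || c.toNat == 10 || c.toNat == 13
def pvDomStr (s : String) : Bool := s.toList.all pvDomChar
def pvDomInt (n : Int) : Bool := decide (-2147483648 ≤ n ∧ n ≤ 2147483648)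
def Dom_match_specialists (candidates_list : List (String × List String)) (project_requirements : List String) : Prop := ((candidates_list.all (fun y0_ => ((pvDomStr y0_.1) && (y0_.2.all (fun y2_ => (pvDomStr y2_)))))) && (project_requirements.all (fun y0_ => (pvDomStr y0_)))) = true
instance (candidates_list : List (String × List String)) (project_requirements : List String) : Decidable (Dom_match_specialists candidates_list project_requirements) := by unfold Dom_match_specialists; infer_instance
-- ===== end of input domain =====

-- B replaces A's counting dict + precomputed rare_skills set with a saturating once/twice/common
-- three-set classifier and builds the result by structural recursion (objective: alternative).
-- Candidate skill collections and the returned skill lists are Python sets (List String of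
-- distinct elements); both ports keep a candidate's skills in the stored order, which is exact
-- up to set equality (the result cannot depend on Python's hash iteration order).

-- ===== PORT A =====
-- A's inner requirements loop with break: returns False at the first req not in skills.
def pvHasAllA (reqs skills : List String) : Bool :=
  match reqs with
  | [] => true
  | r :: rest => if !(skills.contains r) then false else pvHasAllA rest skills

-- first pass: skill_counts, 'if skill in counts: +=1 else: =1'
def pvCountsA (candidates_list : List (String × List String)) : PySem.Dict String Int :=
  candidates_list.foldl (fun d c =>
    c.2.foldl (fun d s =>
      if d.contains s then d.insert s (d.getD s 0 + 1) else d.insert s 1) d) PySem.Dict.empty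

-- second pass: rare_skills = set of keys with count < 3 (getD is exact: every key is present)
def pvRareA (skill_counts : PySem.Dict String Int) : PySem.Set String :=
  skill_counts.keys.foldl (fun rs k =>
    if skill_counts.getD k 0 < 3 then rs.add k else rs) PySem.Set.empty

def match_specialists (candidates_list : List (String × List String)) (project_requirements : List String) : List (String × List String) :=
  let skill_counts := pvCountsA candidates_list
  let rare_skills := pvRareA skill_counts
  -- third pass: filter candidates, 'skills & rare_skills', append when truthy (non-empty)
  candidates_list.foldl (fun result c =>
    if pvHasAllA project_requirements c.2 then
      let rare_in := PySem.Set.inter c.2 rare_skills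
      if rare_in.isEmpty then result else result ++ [(c.1, rare_in)]
    else result) []

-- ===== PORT B =====
-- one automaton step: state (once, twice, common); membership tests in B's branch order
def pvBucketStep (st : PySem.Set String × PySem.Set String × PySem.Set String) (s : String) :
    PySem.Set String × PySem.Set String × PySem.Set String :=
  if PySem.Set.contains st.2.2 s then st
  else if PySem.Set.contains st.2.1 s then
    (st.1, PySem.Set.discard st.2.1 s, PySem.Set.add st.2.2 s)
  else if PySem.Set.contains st.1 s then
    (PySem.Set.discard st.1 s, PySem.Set.add st.2.1 s, st.2.2)
  else (PySem.Set.add st.1 s, st.2.1, st.2.2)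

-- the classifying scan over all candidates' skills
def pvBuckets (candidates_list : List (String × List String)) :
    PySem.Set String × PySem.Set String × PySem.Set String :=
  candidates_list.foldl (fun st c => c.2.foldl pvBucketStep st)
    (PySem.Set.empty, PySem.Set.empty, PySem.Set.empty)

-- B's recursive pick: tail first, then prepend the head's contribution if any
def pvPick (required : List String) (common : PySem.Set String) :
    List (String × List String) → List (String × List String)
  | [] => []
  | c :: rest =>
    let tail := pvPick required common rest
    if PySem.Set.issubset required c.2 then
      let rare := PySem.Set.diff c.2 common
      if rare.isEmpty then tail else (c.1, rare) :: tail
    else tail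

def match_specialists_alt (candidates_list : List (String × List String)) (project_requirements : List String) : List (String × List String) :=
  let st := pvBuckets candidates_list
  pvPick (PySem.Set.ofList project_requirements) st.2.2 candidates_list

-- ===== PRECONDITION & SPEC =====
def Spec_match_specialists (candidates_list : List (String × List String)) (project_requirements : List String) (out : List (String × List String)) : Prop := out = match_specialists_alt candidates_list project_requirements
instance (candidates_list : List (String × List String)) (project_requirements : List String) (out : List (String × List String)) : Decidable (Spec_match_specialists candidates_list project_requirements out) := by unfold Spec_match_specialists; infer_instance

-- ===== CLAIM (what is proved, stated in full; the proofs are below) =====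
def Claim_equal_match_specialists : Prop := ∀ (candidates_list : List (String × List String)) (project_requirements : List String), Dom_match_specialists candidates_list project_requirements → Spec_match_specialists candidates_list project_requirements (match_specialists candidates_list project_requirements)

-- ===== LEMMAS AND PROOFS =====

-- both nested per-candidate folds are folds over the flattened skill stream
theorem foldl_nested_eq_flatMap {beta : Type} (f : beta -> String -> beta)
    (cl : List (String × List String)) (init : beta) :
    cl.foldl (fun b c => c.2.foldl f b) init = (cl.flatMap (fun c => c.2)).foldl f init := by
  induction cl generalizing init with
  | nil => rfl
  | cons c t ih => simp [List.foldl_append, ih]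

-- A's conditional count update equals the unconditional get-default update.
theorem count_step_eq (d : PySem.Dict String Int) (s : String) :
    (if d.contains s then d.insert s (d.getD s 0 + 1) else d.insert s 1)
      = d.insert s (d.getD s 0 + 1) := by
  by_cases h : d.contains s = true
  · simp [h]
  · have hnone : d.get? s = none := by
      rw [PySem.Dict.contains_eq_isSome_get?] at h
      cases hg : d.get? s with
      | none => rfl
      | some v => rw [hg] at h; simp at h
    simp [h, PySem.Dict.getD, hnone]

-- A's counting fold, rewritten over the flattened stream with unconditional updates
theorem countsA_eq (cl : List (String × List String)) :
    pvCountsA cl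
      = (cl.flatMap (fun c => c.2)).foldl (fun d s => d.insert s (d.getD s 0 + 1))
          PySem.Dict.empty := by
  unfold pvCountsA
  have h1 : cl.foldl (fun d c => c.2.foldl (fun d s =>
        if d.contains s then d.insert s (d.getD s 0 + 1) else d.insert s 1) d)
        (PySem.Dict.empty : PySem.Dict String Int)
      = cl.foldl (fun d c => c.2.foldl (fun d s => d.insert s (d.getD s 0 + 1)) d)
          (PySem.Dict.empty : PySem.Dict String Int) := by
    apply PySem.List.foldl_congr_mem
    intro acc c _
    apply PySem.List.foldl_congr_mem
    intro d x _
    exact count_step_eq d x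
  rw [h1]
  exact foldl_nested_eq_flatMap _ cl _

-- A's dict holds the occurrence count of each skill in the flattened stream
theorem countsA_getD (cl : List (String × List String)) (s : String) :
    (pvCountsA cl).getD s 0 = ((cl.flatMap (fun c => c.2)).count s : Int) := by
  rw [countsA_eq, PySem.Dict.getD_foldl_insert_add_one]
  simp

theorem countsA_keys_mem (cl : List (String × List String)) (s : String) :
    s ∈ (pvCountsA cl).keys ↔ s ∈ cl.flatMap (fun c => c.2) := by
  rw [countsA_eq, PySem.Dict.keys_foldl_insert, PySem.Set.mem_update]
  simp [PySem.Dict.keys, PySem.Dict.empty]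

-- membership in the filtered-add fold building rare_skills
theorem mem_rare_fold (p : String → Prop) [DecidablePred p] (l : List String)
    (init : PySem.Set String) (x : String) :
    x ∈ l.foldl (fun rs k => if p k then rs.add k else rs) init
      ↔ x ∈ init ∨ (x ∈ l ∧ p x) := by
  induction l generalizing init with
  | nil => simp
  | cons k t ih =>
    simp only [List.foldl_cons]
    rw [ih]
    by_cases hk : p k
    · simp only [if_pos hk]
      rw [PySem.Set.mem_add]
      constructor
      · rintro (⟨h | h⟩ | h)
        · exact Or.inl h
        · exact Or.inr ⟨by simp [h], by simpa [h] using hk⟩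
        · exact Or.inr ⟨by simp [h.1], h.2⟩
      · rintro (h | ⟨hm, hp⟩)
        · exact Or.inl (Or.inl h)
        · rcases List.mem_cons.mp hm with h | h
          · exact Or.inl (Or.inr h)
          · exact Or.inr ⟨h, hp⟩
    · simp only [if_neg hk]
      constructor
      · rintro (h | h)
        · exact Or.inl h
        · exact Or.inr ⟨List.mem_cons_of_mem _ h.1, h.2⟩
      · rintro (h | ⟨hm, hp⟩)
        · exact Or.inl h
        · rcases List.mem_cons.mp hm with h | h
          · subst h; exact absurd hp hk
          · exact Or.inr ⟨h, hp⟩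

-- A's rare set: exactly the skills of the stream with count < 3
theorem mem_rareA (cl : List (String × List String)) (s : String) :
    s ∈ pvRareA (pvCountsA cl)
      ↔ s ∈ cl.flatMap (fun c => c.2) ∧ (cl.flatMap (fun c => c.2)).count s < 3 := by
  unfold pvRareA
  rw [mem_rare_fold (fun k => (pvCountsA cl).getD k 0 < 3)]
  rw [countsA_keys_mem]
  have : ((pvCountsA cl).getD s 0 < 3) ↔ (cl.flatMap (fun c => c.2)).count s < 3 := by
    rw [countsA_getD]; exact_mod_cast Iff.rfl
  rw [this]
  simp [PySem.Set.empty]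

-- the bucket invariant, one step: once/twice/common classify skills by their count so far
theorem step_inv (xs : List String) (a : String)
    (st : PySem.Set String × PySem.Set String × PySem.Set String)
    (h : ∀ s, (s ∈ st.1 ↔ xs.count s = 1) ∧ (s ∈ st.2.1 ↔ xs.count s = 2)
          ∧ (s ∈ st.2.2 ↔ 3 ≤ xs.count s)) :
    ∀ s, (s ∈ (pvBucketStep st a).1 ↔ (xs ++ [a]).count s = 1)
        ∧ (s ∈ (pvBucketStep st a).2.1 ↔ (xs ++ [a]).count s = 2)
        ∧ (s ∈ (pvBucketStep st a).2.2 ↔ 3 ≤ (xs ++ [a]).count s) := by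
  intro s
  obtain ⟨h1, h2, h3⟩ := h s
  obtain ⟨a1, a2, a3⟩ := h a
  have hcnt : (xs ++ [a]).count s = xs.count s + (if s = a then 1 else 0) := by
    by_cases hsa : s = a
    · simp [List.count_append, hsa]
    · have has : ¬ a = s := fun hh => hsa hh.symm
      simp [List.count_append, hsa, has]
  unfold pvBucketStep
  by_cases hc : PySem.Set.contains st.2.2 a = true
  · have ha3 : 3 ≤ xs.count a := a3.mp ((PySem.Set.contains_iff _ _).mp hc)
    simp only [hc, if_true]
    by_cases hsa : s = a
    · subst hsa
      refine ⟨?_, ?_, ?_⟩ <;> rw [hcnt, if_pos rfl]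
      · rw [h1]; omega
      · rw [h2]; omega
      · rw [h3]; omega
    · rw [hcnt, if_neg hsa]
      simp only [Nat.add_zero]
      exact ⟨h1, h2, h3⟩
  · have hc' : a ∉ st.2.2 := fun hm => hc ((PySem.Set.contains_iff _ _).mpr hm)
    simp only [hc, Bool.false_eq_true, if_false]
    by_cases ht : PySem.Set.contains st.2.1 a = true
    · have ha2 : xs.count a = 2 := a2.mp ((PySem.Set.contains_iff _ _).mp ht)
      simp only [ht, if_true]
      by_cases hsa : s = a
      · subst hsa
        refine ⟨?_, ?_, ?_⟩ <;> rw [hcnt, if_pos rfl]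
        · rw [h1]; omega
        · rw [PySem.Set.mem_discard]; simp only [ne_eq, not_true_eq_false, and_false,
            false_iff]; omega
        · rw [PySem.Set.mem_add]; simp only [or_true, true_iff]; omega
      · rw [hcnt, if_neg hsa]
        rw [PySem.Set.mem_discard, PySem.Set.mem_add]
        simp [hsa, h1, h2, h3]
    · have ht' : a ∉ st.2.1 := fun hm => ht ((PySem.Set.contains_iff _ _).mpr hm)
      simp only [ht, Bool.false_eq_true, if_false]
      by_cases ho : PySem.Set.contains st.1 a = true
      · have ha1 : xs.count a = 1 := a1.mp ((PySem.Set.contains_iff _ _).mp ho)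
        simp only [ho, if_true]
        by_cases hsa : s = a
        · subst hsa
          refine ⟨?_, ?_, ?_⟩ <;> rw [hcnt, if_pos rfl]
          · rw [PySem.Set.mem_discard]; simp only [ne_eq, not_true_eq_false, and_false,
              false_iff]; omega
          · rw [PySem.Set.mem_add]; simp only [or_true, true_iff]; omega
          · rw [h3]; omega
        · rw [hcnt, if_neg hsa]
          rw [PySem.Set.mem_discard, PySem.Set.mem_add]
          simp [hsa, h1, h2, h3]
      · have ho' : a ∉ st.1 := fun hm => ho ((PySem.Set.contains_iff _ _).mpr hm)
        have n1 : xs.count a ≠ 1 := fun hn => ho' (a1.mpr hn)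
        have n2 : xs.count a ≠ 2 := fun hn => ht' (a2.mpr hn)
        have n3 : ¬ 3 ≤ xs.count a := fun hn => hc' (a3.mpr hn)
        have ha0 : xs.count a = 0 := by omega
        simp only [ho, Bool.false_eq_true, if_false]
        by_cases hsa : s = a
        · subst hsa
          refine ⟨?_, ?_, ?_⟩ <;> rw [hcnt, if_pos rfl]
          · rw [PySem.Set.mem_add]; simp only [or_true, true_iff]; omega
          · rw [h2]; omega
          · rw [h3]; omega
        · rw [hcnt, if_neg hsa]
          rw [PySem.Set.mem_add]
          simp [hsa, h1, h2, h3]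

-- the full bucket invariant over the flattened stream
theorem buckets_inv (xs : List String) :
    ∀ s, (s ∈ (xs.foldl pvBucketStep (PySem.Set.empty, PySem.Set.empty, PySem.Set.empty)).1
          ↔ xs.count s = 1)
      ∧ (s ∈ (xs.foldl pvBucketStep (PySem.Set.empty, PySem.Set.empty, PySem.Set.empty)).2.1
          ↔ xs.count s = 2)
      ∧ (s ∈ (xs.foldl pvBucketStep (PySem.Set.empty, PySem.Set.empty, PySem.Set.empty)).2.2
          ↔ 3 ≤ xs.count s) := by
  induction xs using List.reverseRecOn with
  | nil => intro s; simp [PySem.Set.empty]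
  | append_singleton ys a ih =>
    intro s
    rw [List.foldl_append]
    exact step_inv ys a _ ih s

-- B's common set holds exactly the skills with count ≥ 3
theorem mem_common (cl : List (String × List String)) (s : String) :
    s ∈ (pvBuckets cl).2.2 ↔ 3 ≤ (cl.flatMap (fun c => c.2)).count s := by
  unfold pvBuckets
  rw [foldl_nested_eq_flatMap pvBucketStep cl]
  exact (buckets_inv (cl.flatMap (fun c => c.2)) s).2.2

-- A's 'skills & rare_skills' equals B's 'skills - common', for a candidate of the list
theorem inter_rare_eq_diff_common (cl : List (String × List String))
    (skills : List String) (hc : ∃ c ∈ cl, skills = c.2) :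
    PySem.Set.inter skills (pvRareA (pvCountsA cl))
      = PySem.Set.diff skills (pvBuckets cl).2.2 := by
  unfold PySem.Set.inter PySem.Set.diff
  apply List.filter_congr
  intro s hs
  have hmem : s ∈ cl.flatMap (fun c => c.2) := by
    rcases hc with ⟨c, hcmem, rfl⟩
    exact List.mem_flatMap.mpr ⟨c, hcmem, hs⟩
  by_cases hcm : s ∈ (pvBuckets cl).2.2
  · have hct : PySem.Set.contains (pvBuckets cl).2.2 s = true :=
      (PySem.Set.contains_iff _ _).mpr hcm
    rw [hct]
    simp only [Bool.not_true]
    rw [Bool.eq_false_iff]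
    intro htr
    have := (mem_rareA cl s).mp ((PySem.Set.contains_iff _ _).mp htr)
    have := (mem_common cl s).mp hcm
    omega
  · have hcf : PySem.Set.contains (pvBuckets cl).2.2 s = false :=
      Bool.eq_false_iff.mpr (fun hh => hcm ((PySem.Set.contains_iff _ _).mp hh))
    rw [hcf]
    simp only [Bool.not_false]
    apply (PySem.Set.contains_iff _ _).mpr
    apply (mem_rareA cl s).mpr
    refine ⟨hmem, ?_⟩
    have hn : ¬ 3 ≤ (cl.flatMap (fun c => c.2)).count s :=
      fun hh => hcm ((mem_common cl s).mpr hh)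
    omega

-- A's break-loop equals B's required.issubset(skills)
theorem hasAll_iff (reqs skills : List String) :
    pvHasAllA reqs skills = true ↔ ∀ r ∈ reqs, r ∈ skills := by
  induction reqs with
  | nil => simp [pvHasAllA]
  | cons r rest ih =>
    by_cases hm : r ∈ skills <;> simp [pvHasAllA, hm, ih]

theorem hasAll_eq_issubset (reqs skills : List String) :
    pvHasAllA reqs skills = PySem.Set.issubset (PySem.Set.ofList reqs) skills := by
  rw [Bool.eq_iff_iff, hasAll_iff, PySem.Set.issubset_iff]
  simp [PySem.Set.mem_ofList]

-- A's accumulating fold over a suffix equals acc ++ B's recursive pick, given the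
-- per-candidate agreements on the subset test and the rare set
theorem foldA_eq_pick (pr : List String) (rare common : PySem.Set String)
    (l : List (String × List String)) (acc : List (String × List String))
    (h : ∀ c ∈ l, pvHasAllA pr c.2 = PySem.Set.issubset (PySem.Set.ofList pr) c.2
          ∧ PySem.Set.inter c.2 rare = PySem.Set.diff c.2 common) :
    l.foldl (fun result c =>
      if pvHasAllA pr c.2 then
        let rare_in := PySem.Set.inter c.2 rare
        if rare_in.isEmpty then result else result ++ [(c.1, rare_in)]
      else result) acc
      = acc ++ pvPick (PySem.Set.ofList pr) common l := by
  induction l generalizing acc with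
  | nil => simp [pvPick]
  | cons c t ih =>
    obtain ⟨hsub, hrare⟩ := h c (List.mem_cons_self ..)
    have ht : ∀ c' ∈ t, pvHasAllA pr c'.2 = PySem.Set.issubset (PySem.Set.ofList pr) c'.2
        ∧ PySem.Set.inter c'.2 rare = PySem.Set.diff c'.2 common :=
      fun c' hc' => h c' (List.mem_cons_of_mem _ hc')
    simp only [List.foldl_cons, pvPick, hsub, hrare]
    by_cases hq : PySem.Set.issubset (PySem.Set.ofList pr) c.2 = true
    · simp only [hq, if_true]
      by_cases he : (PySem.Set.diff c.2 common).isEmpty = true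
      · simp only [he, if_true]; exact ih acc ht
      · simp only [he, Bool.false_eq_true, if_false]
        rw [ih _ ht]; simp
    · simp only [hq, Bool.false_eq_true, if_false]; exact ih acc ht

theorem match_specialists_eq (cl : List (String × List String)) (pr : List String) :
    match_specialists cl pr = match_specialists_alt cl pr := by
  unfold match_specialists match_specialists_alt
  rw [foldA_eq_pick pr (pvRareA (pvCountsA cl)) (pvBuckets cl).2.2 cl []
    (by
      intro c hc
      exact ⟨hasAll_eq_issubset pr c.2, inter_rare_eq_diff_common cl c.2 ⟨c, hc, rfl⟩⟩)]
  simp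

-- ===== VERDICT (by name: the statement is the Claim_ definition above) =====
theorem match_specialists_spec : Claim_equal_match_specialists := by
  intro cl pr _
  unfold Spec_match_specialists
  exact match_specialists_eq cl pr
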